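-- pv_equiv track=rewrite | github.com/Thakar-Lab/scBONITA2 | code/rule_determination.py | generate_not_combinations
-- ===== SOURCE A (Python) =====
-- from itertools import product
--
-- def generate_not_combinations(rule):
--     """
--     Finds all possible combinations of rules with and without "not" (input rules in ABC format)
--
--     return all_not_combinations
--     """
--
--     variables = []
--
--     if 'A' in rule:
--         variables.append('A')
--     if 'B' in rule:
--         variables.append('B')
--     if 'C' in rule:
--         variables.append('C')
--     if 'D' in rule:
--         variables.append('D')
--
--     # Remove the existing 'not' statements
--     rule = rule.replace('not ', '')
--
--     # Generate all possible combinations of the variables and their negations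
--     combinations = list(product(*[(var, f'not {var}') for var in variables]))
--
--     all_not_combinations = []
--     for combo in combinations:
--         # Create a temporary rule with the current combination
--         temp_rule = rule
--         for var, replacement in zip(variables, combo):
--             # Replace variables with the current combination of variable or its negation
--             temp_rule = temp_rule.replace(var, replacement)
--         all_not_combinations.append(temp_rule)
--
--     return all_not_combinations
-- ===== SOURCE B (Python) =====
-- def generate_not_combinations(rule):
--     variables = [v for v in 'ABCD' if v in rule]
--     rule = rule.replace('not ', '')
--     results = [rule]
--     for var in variables:
--         results = [x for r in results for x in (r, r.replace(var, 'not ' + var))]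
--     return results
-- ===== Notes on version B (the rewrite author's own statement) =====
-- stated objective: simpler
-- what changed: Replaces itertools.product plus a per-combination zip/replace loop by a single doubling pass: start from the de-notted rule and, for each variable present, extend every accumulated string with its unchanged and its negated variant.
import Mathlib
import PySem

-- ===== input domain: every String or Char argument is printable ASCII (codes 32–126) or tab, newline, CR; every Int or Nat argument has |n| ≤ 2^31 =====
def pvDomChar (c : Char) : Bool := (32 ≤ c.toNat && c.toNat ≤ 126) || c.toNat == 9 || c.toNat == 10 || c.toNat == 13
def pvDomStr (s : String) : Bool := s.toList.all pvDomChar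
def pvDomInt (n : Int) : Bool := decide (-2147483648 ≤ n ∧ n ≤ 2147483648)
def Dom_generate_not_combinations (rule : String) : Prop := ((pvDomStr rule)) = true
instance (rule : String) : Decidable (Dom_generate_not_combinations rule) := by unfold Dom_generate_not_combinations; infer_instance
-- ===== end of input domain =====

-- B drops itertools.product: it grows the result list by doubling per variable (same order, same strings); objective: simpler.

-- ===== PORT A =====
-- itertools.product over a list of pools (first pool varies slowest), as A uses it
def pvProduct (pools : List (List String)) : List (List String) :=
  match pools with
  | [] => [[]]
  | p :: ps => p.flatMap (fun x => (pvProduct ps).map (fun c => x :: c))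

def generate_not_combinations (rule : String) : List String :=
  let vars1 : List String := if PySem.Str.isIn "A" rule then [] ++ ["A"] else []
  let vars2 := if PySem.Str.isIn "B" rule then vars1 ++ ["B"] else vars1
  let vars3 := if PySem.Str.isIn "C" rule then vars2 ++ ["C"] else vars2
  let vars4 := if PySem.Str.isIn "D" rule then vars3 ++ ["D"] else vars3
  let rule' := PySem.Str.replace rule "not " ""
  let combinations := pvProduct (vars4.map (fun v => [v, "not " ++ v]))
  combinations.foldl
    (fun acc combo =>
      acc ++ [(vars4.zip combo).foldl (fun t p => PySem.Str.replace t p.1 p.2) rule']) []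

-- ===== PORT B =====
def generate_not_combinations_alt (rule : String) : List String :=
  let vars := ["A", "B", "C", "D"].filter (fun v => PySem.Str.isIn v rule)
  let rule' := PySem.Str.replace rule "not " ""
  vars.foldl
    (fun results var =>
      results.flatMap (fun r => [r, PySem.Str.replace r var ("not " ++ var)])) [rule']

-- ===== PRECONDITION & SPEC =====
def Spec_generate_not_combinations (rule : String) (out : List String) : Prop := out = generate_not_combinations_alt rule
instance (rule : String) (out : List String) : Decidable (Spec_generate_not_combinations rule out) := by unfold Spec_generate_not_combinations; infer_instance

-- ===== CLAIM (what is proved, stated in full; the proofs are below) =====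
def Claim_equal_generate_not_combinations : Prop := ∀ (rule : String), Dom_generate_not_combinations rule → Spec_generate_not_combinations rule (generate_not_combinations rule)

-- ===== LEMMAS AND PROOFS =====

-- doubling tree: the common value both ports compute
def pvDbl : List String → String → List String
  | [], r => [r]
  | v :: vs, r => pvDbl vs r ++ pvDbl vs (PySem.Str.replace r v ("not " ++ v))

-- replace.go with old = new is the identity (invariant acc.reverse ++ l)
theorem pv_replace_go_self (p : List Char) :
    ∀ (fuel : Nat) (l acc : List Char),
      PySem.Chars.replace.go p p fuel l acc = acc.reverse ++ l := by
  intro fuel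
  induction fuel with
  | zero => intro l acc; rfl
  | succ n ih =>
    intro l acc
    cases l with
    | nil => simp [PySem.Chars.replace.go]
    | cons c t =>
      rw [PySem.Chars.replace.go]
      by_cases hp : p.isPrefixOf (c :: t) = true
      · rw [if_pos hp, ih]
        have hpre : p <+: (c :: t) := List.isPrefixOf_iff_prefix.mp hp
        have := List.prefix_iff_eq_append.mp hpre
        simp only [List.reverse_append, List.reverse_reverse]
        rw [List.append_assoc, this]
      · rw [if_neg hp, ih]; simp

-- replacing a nonempty pattern by itself does nothing
theorem pv_replace_self (s p : String) (hp : p.toList ≠ []) :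
    PySem.Str.replace s p p = s := by
  unfold PySem.Str.replace PySem.Chars.replace
  rw [if_neg (by simpa [List.isEmpty_iff] using hp), pv_replace_go_self]
  simp

-- A's map over the product equals the doubling tree
theorem pv_A_eq_dbl (vs : List String) (hvs : ∀ v ∈ vs, v.toList ≠ []) (r : String) :
    (pvProduct (vs.map (fun v => [v, "not " ++ v]))).map
        (fun c => (vs.zip c).foldl (fun t p => PySem.Str.replace t p.1 p.2) r)
      = pvDbl vs r := by
  induction vs generalizing r with
  | nil => rfl
  | cons v vs ih =>
    simp only [List.map_cons, pvProduct, List.flatMap_cons, List.flatMap_nil,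
      List.map_nil, List.append_nil, pvDbl, List.map_append, List.map_map]
    have step : ∀ (x : String),
        (pvProduct (vs.map (fun v => [v, "not " ++ v]))).map
            ((fun c => ((v :: vs).zip c).foldl (fun t p => PySem.Str.replace t p.1 p.2) r) ∘
              (fun c => x :: c))
          = pvDbl vs (PySem.Str.replace r v x) := by
      intro x
      rw [← ih (fun w hw => hvs w (List.mem_cons_of_mem _ hw))]
      apply List.map_congr_left
      intro c _
      simp [List.zip]
    rw [step, step, pv_replace_self r v (hvs v (List.mem_cons_self))]

-- B's foldl distributes over the accumulator as flatMap of the doubling tree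
theorem pv_B_eq_dbl (vs : List String) :
    ∀ (acc : List String),
      vs.foldl (fun results var =>
          results.flatMap (fun r => [r, PySem.Str.replace r var ("not " ++ var)])) acc
        = acc.flatMap (pvDbl vs) := by
  induction vs with
  | nil => intro acc; simp [pvDbl]
  | cons v vs ih =>
    intro acc
    simp only [List.foldl_cons, ih, List.flatMap_assoc]
    apply List.flatMap_congr
    intro r _
    simp [pvDbl]

-- ===== VERDICT (by name: the statement is the Claim_ definition above) =====
theorem generate_not_combinations_spec : Claim_equal_generate_not_combinations := by
  intro rule _
  unfold Spec_generate_not_combinations generate_not_combinations generate_not_combinations_alt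
  cases hA : PySem.Str.isIn "A" rule <;> cases hB : PySem.Str.isIn "B" rule <;>
    cases hC : PySem.Str.isIn "C" rule <;> cases hD : PySem.Str.isIn "D" rule <;>
  · simp only [hA, hB, hC, hD, if_true, if_false, List.filter, Bool.false_eq_true,
      List.nil_append]
    rw [PySem.List.foldl_append_singleton_eq_map, pv_A_eq_dbl _ (by intro v hv; fin_cases hv <;> decide),
      pv_B_eq_dbl]
    simp
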